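-- pv_equiv track=rewrite | github.com/noahbt/advent | 2024/p9.py | compact_filemap
-- ===== SOURCE A (Python) =====
-- def compact_filemap(filemap):
--     i, j = 0, len(filemap) - 1
--     result = []
--     while i <= j:
--         if filemap[i] >= 0:
--             result.append(filemap[i])
--             i += 1
--         else:
--             if filemap[j] >= 0:
--                 result.append(filemap[j])
--                 i += 1
--             j -= 1
--     while i < len(filemap):
--         result.append(-1)
--         i += 1
--     return result
-- ===== SOURCE B (Python) =====
-- def compact_filemap(filemap):
--     files = [x for x in filemap if x >= 0]
--     total = len(files)
--     result = []
--     for x in filemap[:total]: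
--         if x >= 0:
--             result.append(x)
--         else:
--             result.append(files.pop())
--     result.extend([-1] * (len(filemap) - total))
--     return result
-- ===== Notes on version B (the rewrite author's own statement) =====
-- stated objective: simpler
-- what changed: Replaces the two-pointer i/j while-loop with one pass over the first total positions (total = number of file blocks), filling each gap by popping the filtered file-value list used as a stack, then padding with -1; the filter/slice comprehension and list.pop run at C speed, giving a measured constant-factor speedup.
import Mathlib
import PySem

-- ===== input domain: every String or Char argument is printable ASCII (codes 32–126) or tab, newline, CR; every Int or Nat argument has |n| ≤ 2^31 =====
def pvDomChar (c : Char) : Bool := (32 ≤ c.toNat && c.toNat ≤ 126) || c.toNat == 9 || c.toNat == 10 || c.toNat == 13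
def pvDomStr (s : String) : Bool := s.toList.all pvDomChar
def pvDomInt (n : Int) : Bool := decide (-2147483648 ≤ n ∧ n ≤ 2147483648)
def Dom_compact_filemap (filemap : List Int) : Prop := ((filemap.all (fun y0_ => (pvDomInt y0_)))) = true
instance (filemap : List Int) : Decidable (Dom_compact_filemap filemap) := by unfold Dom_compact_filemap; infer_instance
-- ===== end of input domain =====

-- B replaces A's two-pointer while-loop by a single pass over the first `total`
-- positions, popping gaps' fill values from the filtered file list (simpler).

-- ===== PORT A =====
-- the `while i <= j` loop; state (i, j); returns (result, final i)
def pvAloop (xs : List Int) (i j : Int) : List Int × Int :=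
  if i ≤ j then
    match PySem.List.pyGet? xs i, PySem.List.pyGet? xs j with
    | some xi, some xj =>
      if 0 ≤ xi then
        let r := pvAloop xs (i + 1) j
        (xi :: r.1, r.2)
      else if 0 ≤ xj then
        let r := pvAloop xs (i + 1) (j - 1)
        (xj :: r.1, r.2)
      else pvAloop xs i (j - 1)
    | _, _ => ([], i)   -- IndexError: unreachable while 0 ≤ i ≤ j < len
  else ([], i)
termination_by (j + 1 - i).toNat
decreasing_by all_goals omega

-- the `while i < len(filemap)` padding loop
def pvPad (i n : Int) : List Int :=
  if i < n then -1 :: pvPad (i + 1) n else []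
termination_by (n - i).toNat
decreasing_by omega

def compact_filemap (filemap : List Int) : List Int :=
  let r := pvAloop filemap 0 ((filemap.length : Int) - 1)
  r.1 ++ pvPad r.2 (filemap.length : Int)

-- ===== PORT B =====
-- the `for x in filemap[:total]` loop; `files` is mutated by `files.pop()`
def pvBloop : List Int → List Int → List Int
  | [], _ => []
  | x :: r, files =>
    if 0 ≤ x then x :: pvBloop r files
    else
      match files.getLast? with
      | some y => y :: pvBloop r files.dropLast
      | none => pvBloop r files   -- files.pop() on empty raises: unreachable

def compact_filemap_alt (filemap : List Int) : List Int :=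
  let files := filemap.filter (fun x => decide (0 ≤ x))
  let total := files.length
  pvBloop (PySem.List.slice filemap none (some (total : Int))) files
    ++ List.replicate (filemap.length - total) (-1)

-- ===== PRECONDITION & SPEC =====
def Spec_compact_filemap (filemap : List Int) (out : List Int) : Prop := out = compact_filemap_alt filemap
instance (filemap : List Int) (out : List Int) : Decidable (Spec_compact_filemap filemap out) := by unfold Spec_compact_filemap; infer_instance

-- ===== CLAIM (what is proved, stated in full; the proofs are below) =====
def Claim_equal_compact_filemap : Prop := ∀ (filemap : List Int), Dom_compact_filemap filemap → Spec_compact_filemap filemap (compact_filemap filemap)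

-- ===== LEMMAS AND PROOFS =====

-- canonical segment compaction: A's loop restricted to the segment xs[i..j]
def pvFseg : List Int → List Int
  | [] => []
  | x :: r =>
    if 0 ≤ x then x :: pvFseg r
    else
      match (x :: r).getLast? with
      | some z =>
        if 0 ≤ z then z :: pvFseg r.dropLast else pvFseg ((x :: r).dropLast)
      | none => []
termination_by l => l.length
decreasing_by all_goals simp [List.length_dropLast] <;> omega

-- canonical fill: walk the prefix, gaps take from the supply (reversed suffix files)
def pvFill : List Int → List Int → List Int
  | [], _ => []
  | x :: r, sup =>
    if 0 ≤ x then x :: pvFill r sup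
    else
      match sup with
      | y :: ys => y :: pvFill r ys
      | [] => pvFill r []

theorem pvLenFill (pre sup : List Int)
    (h : pre.countP (fun x => decide (x < 0)) ≤ sup.length) :
    (pvFill pre sup).length = pre.length := by
  induction pre generalizing sup with
  | nil => simp [pvFill]
  | cons x r ih =>
    by_cases hx : 0 ≤ x
    · have h' : r.countP (fun x => decide (x < 0)) ≤ sup.length := by
        simpa [List.countP_cons, hx, show ¬ x < 0 by omega] using h
      simp [pvFill, hx, ih sup h']
    · have hc : r.countP (fun x => decide (x < 0)) + 1 ≤ sup.length := by
        simpa [List.countP_cons, show x < 0 by omega] using h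
      match sup with
      | [] => simp at hc
      | y :: ys =>
        have h' : r.countP (fun x => decide (x < 0)) ≤ ys.length := by
          simpa using hc
        simp [pvFill, hx, ih ys h']

theorem pvFseg_fill_aux : ∀ (n : Nat) (s : List Int), s.length ≤ n →
    pvFseg s = pvFill (s.take ((s.filter (fun x => decide (0 ≤ x))).length))
      (((s.drop ((s.filter (fun x => decide (0 ≤ x))).length)).filter (fun x => decide (0 ≤ x))).reverse) := by
  intro n
  induction n with
  | zero =>
    intro s hs
    have hsn : s = [] := by cases s <;> simp_all
    subst hsn; simp [pvFseg, pvFill]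
  | succ n ih =>
    intro s hs
    match s with
    | [] => simp [pvFseg, pvFill]
    | x :: r =>
      by_cases hx : 0 ≤ x
      · have hr : r.length ≤ n := by simpa using hs
        simp only [pvFseg, hx, if_pos, List.filter_cons, decide_true, List.length_cons,
          List.take_succ_cons, List.drop_succ_cons, pvFill]
        rw [ih r hr]
      · rcases r.eq_nil_or_concat with rfl | ⟨mid, z, hb⟩
        · simp [pvFseg, pvFill, hx]
        · rw [List.concat_eq_append] at hb; subst hb
          have hlast : (x :: (mid ++ [z])).getLast? = some z := by
            rw [show x :: (mid ++ [z]) = (x :: mid) ++ [z] from rfl]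
            exact List.getLast?_concat
          have hlen : mid.length + 2 ≤ n + 1 := by
            simpa [List.length_append] using hs
          by_cases hz : 0 ≤ z
          · have hm : (mid.filter (fun x => decide (0 ≤ x))).length ≤ mid.length :=
              List.length_filter_le _ _
            have hfil : (x :: (mid ++ [z])).filter (fun x => decide (0 ≤ x)) =
                mid.filter (fun x => decide (0 ≤ x)) ++ [z] := by
              simp [List.filter_cons, List.filter_append, hx, hz]
            have hA : pvFseg (x :: (mid ++ [z])) = z :: pvFseg mid := by
              simp [pvFseg, hx, hlast, hz, List.dropLast_concat]
            rw [hA, hfil, List.length_append, List.length_singleton,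
              List.take_succ_cons, List.take_append_of_le_length hm,
              List.drop_succ_cons, List.drop_append_of_le_length hm,
              List.filter_append]
            rw [ih mid (by omega)]
            simp [pvFill, hx, hz]
          · have ht : (x :: mid).filter (fun x => decide (0 ≤ x)) =
                mid.filter (fun x => decide (0 ≤ x)) := by
              simp [List.filter_cons, hx]
            have hm : ((x :: mid).filter (fun x => decide (0 ≤ x))).length ≤ mid.length := by
              rw [ht]; exact List.length_filter_le _ _
            have hm' : ((x :: mid).filter (fun x => decide (0 ≤ x))).length ≤ (x :: mid).length := by
              simp; omega
            have hfil : (x :: (mid ++ [z])).filter (fun x => decide (0 ≤ x)) =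
                (x :: mid).filter (fun x => decide (0 ≤ x)) := by
              simp [List.filter_cons, List.filter_append, hx, hz]
            have hd : (x :: (mid ++ [z])).dropLast = x :: mid := by
              rw [show x :: (mid ++ [z]) = (x :: mid) ++ [z] from rfl, List.dropLast_concat]
            have hA : pvFseg (x :: (mid ++ [z])) = pvFseg (x :: mid) := by
              conv_lhs => simp only [pvFseg, hx, hlast, hz, hd]
              conv_rhs => simp only [pvFseg, hx]
              simp
            rw [hA, hfil,
              show x :: (mid ++ [z]) = (x :: mid) ++ [z] from rfl,
              List.take_append_of_le_length hm',
              List.drop_append_of_le_length hm',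
              List.filter_append]
            have hz0 : List.filter (fun x => decide (0 ≤ x)) [z] = [] := by simp [hz]
            rw [hz0, List.append_nil]
            exact ih (x :: mid) (by simp; omega)

theorem pvFseg_fill (s : List Int) :
    pvFseg s = pvFill (s.take ((s.filter (fun x => decide (0 ≤ x))).length))
      (((s.drop ((s.filter (fun x => decide (0 ≤ x))).length)).filter (fun x => decide (0 ≤ x))).reverse) := by
  exact pvFseg_fill_aux s.length s le_rfl

theorem pvBloop_fill (pre a b : List Int)
    (h : pre.countP (fun x => decide (x < 0)) = b.length) :
    pvBloop pre (a ++ b) = pvFill pre b.reverse := by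
  induction pre generalizing a b with
  | nil => simp [pvBloop, pvFill]
  | cons x r ih =>
    by_cases hx : 0 ≤ x
    · have h' : r.countP (fun x => decide (x < 0)) = b.length := by
        simpa [List.countP_cons, hx, show ¬ x < 0 by omega] using h
      simp [pvBloop, pvFill, hx, ih a b h']
    · have hc : r.countP (fun x => decide (x < 0)) + 1 = b.length := by
        simpa [List.countP_cons, show x < 0 by omega] using h
      rcases b.eq_nil_or_concat with hb | ⟨b', z, hb⟩
      · simp [hb] at hc
      · rw [List.concat_eq_append] at hb; subst hb
        have h' : r.countP (fun x => decide (x < 0)) = b'.length := by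
          simp at hc; omega
        have hlast : (a ++ (b' ++ [z])).getLast? = some z := by
          rw [← List.append_assoc]; exact List.getLast?_concat
        have hdrop : (a ++ (b' ++ [z])).dropLast = a ++ b' := by
          rw [← List.append_assoc, List.dropLast_concat]
        simp only [pvBloop, pvFill, hx, if_neg hx, hlast, hdrop, List.reverse_append,
          List.reverse_singleton, List.singleton_append]
        rw [ih a b' h']; simp

theorem pvFseg_cons_pos (x : Int) (r : List Int) (hx : 0 ≤ x) :
    pvFseg (x :: r) = x :: pvFseg r := by
  simp [pvFseg, hx]

theorem pvFseg_cons_neg (x z : Int) (r : List Int) (hx : ¬ 0 ≤ x)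
    (hz : (x :: r).getLast? = some z) :
    pvFseg (x :: r) = if 0 ≤ z then z :: pvFseg r.dropLast else pvFseg ((x :: r).dropLast) := by
  conv_lhs => simp only [pvFseg, hx, hz]
  simp

theorem pvAloop_eq (xs : List Int) (i j : Int) (hi : 0 ≤ i) (hj : j < (xs.length : Int)) :
    pvAloop xs i j =
      (pvFseg ((xs.drop i.toNat).take (j + 1 - i).toNat),
       i + ((pvFseg ((xs.drop i.toNat).take (j + 1 - i).toNat)).length : Int)) := by
  by_cases h : i ≤ j
  · have hjn : 0 ≤ j := le_trans hi h
    have hilt : i < (xs.length : Int) := lt_of_le_of_lt h hj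
    have hitn : i.toNat < xs.length := by omega
    have hjtn : j.toNat < xs.length := by omega
    have hgi : PySem.List.pyGet? xs i = some (xs[i.toNat]'hitn) :=
      PySem.List.pyGet?_eq_some_getElem xs hi hilt
    have hgj : PySem.List.pyGet? xs j = some (xs[j.toNat]'hjtn) :=
      PySem.List.pyGet?_eq_some_getElem xs hjn hj
    have hdropc : xs.drop i.toNat = xs[i.toNat] :: xs.drop (i.toNat + 1) :=
      List.drop_eq_getElem_cons hitn
    have hk : (j + 1 - i).toNat = (j - i).toNat + 1 := by omega
    have hseg : (xs.drop i.toNat).take (j + 1 - i).toNat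
        = xs[i.toNat] :: (xs.drop (i.toNat + 1)).take (j - i).toNat := by
      rw [hk, hdropc, List.take_succ_cons]
    have hseg2 : (xs.drop i.toNat).take (j + 1 - i).toNat
        = (xs.drop i.toNat).take (j - i).toNat ++ [xs[j.toNat]] := by
      rw [hk, List.take_add_one]
      congr 1
      rw [List.getElem?_drop, show i.toNat + (j - i).toNat = j.toNat from by omega,
        List.getElem?_eq_getElem hjtn]
      rfl
    have hi1 : (i + 1).toNat = i.toNat + 1 := by omega
    by_cases hxi : 0 ≤ xs[i.toNat]
    · -- filemap[i] >= 0
      have hrec := pvAloop_eq xs (i + 1) j (by omega) hj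
      have hkn : (j + 1 - (i + 1)).toNat = (j - i).toNat := by omega
      rw [hi1, hkn] at hrec
      conv_lhs => rw [pvAloop.eq_def]
      simp only [hgi, hgj, if_pos h, if_pos hxi]
      rw [hrec, hseg, pvFseg_cons_pos _ _ hxi]
      simp only [Prod.mk.injEq, List.length_cons]
      exact ⟨trivial, by push_cast; omega⟩
    · -- filemap[i] < 0 : look at the right end of the segment
      have hlast' : (xs[i.toNat] :: (xs.drop (i.toNat + 1)).take ((j - i).toNat)).getLast?
          = some (xs[j.toNat]'hjtn) := by
        rw [← hseg, hseg2]
        exact List.getLast?_concat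
      by_cases hxj : 0 ≤ xs[j.toNat]
      · -- take the block from the right
        have hij : i < j := by
          rcases lt_or_eq_of_le h with h' | h'
          · exact h'
          · exfalso
            have hv : xs[i.toNat]'hitn = xs[j.toNat]'hjtn := by
              have he : xs[i.toNat]? = xs[j.toNat]? := by
                rw [show i.toNat = j.toNat from by omega]
              rw [List.getElem?_eq_getElem hitn, List.getElem?_eq_getElem hjtn] at he
              exact Option.some.inj he
            rw [hv] at hxi
            exact hxi hxj
        have hrec := pvAloop_eq xs (i + 1) (j - 1) (by omega) (by omega)
        have hkn : (j - 1 + 1 - (i + 1)).toNat = (j - i).toNat - 1 := by omega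
        rw [hi1, hkn] at hrec
        have hrest : (xs.drop (i.toNat + 1)).take (j - i).toNat
            = (xs.drop (i.toNat + 1)).take ((j - i).toNat - 1) ++ [xs[j.toNat]] := by
          have hm1 : (j - i).toNat = ((j - i).toNat - 1) + 1 := by omega
          rw [hm1, List.take_add_one]
          congr 1
          rw [List.getElem?_drop, show i.toNat + 1 + ((j - i).toNat - 1) = j.toNat from by omega,
            List.getElem?_eq_getElem hjtn]
          rfl
        conv_lhs => rw [pvAloop.eq_def]
        simp only [hgi, hgj, if_pos h, if_neg hxi, if_pos hxj]
        rw [hrec, hseg, pvFseg_cons_neg _ _ _ hxi hlast', if_pos hxj, hrest,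
          List.dropLast_concat]
        simp only [Prod.mk.injEq, List.length_cons]
        exact ⟨trivial, by push_cast; omega⟩
      · -- both ends negative: shrink from the right
        have hrec := pvAloop_eq xs i (j - 1) hi (by omega)
        have hkn : (j - 1 + 1 - i).toNat = (j - i).toNat := by omega
        rw [hkn] at hrec
        conv_lhs => rw [pvAloop.eq_def]
        simp only [hgi, hgj, if_pos h, if_neg hxi, if_neg hxj]
        rw [hrec, hseg, pvFseg_cons_neg _ _ _ hxi hlast', if_neg hxj, ← hseg, hseg2,
          List.dropLast_concat]
  · have hk0 : (j + 1 - i).toNat = 0 := by omega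
    rw [pvAloop.eq_def]
    simp [h, hk0, pvFseg]
termination_by (j + 1 - i).toNat
decreasing_by all_goals omega

theorem pvPad_eq (i n : Int) : pvPad i n = List.replicate (n - i).toNat (-1) := by
  by_cases h : i < n
  · rw [pvPad, if_pos h, pvPad_eq (i + 1) n]
    have : (n - i).toNat = (n - (i + 1)).toNat + 1 := by omega
    rw [this, List.replicate_succ]
  · rw [pvPad, if_neg h]
    have : (n - i).toNat = 0 := by omega
    simp [this]
termination_by (n - i).toNat
decreasing_by omega

theorem pvCount (l : List Int) :
    l.countP (fun x => decide (x < 0)) + (l.filter (fun x => decide (0 ≤ x))).length = l.length := by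
  induction l with
  | nil => simp
  | cons x r ih =>
    by_cases hx : 0 ≤ x
    · simp [List.countP_cons, List.filter_cons, hx, show ¬ x < 0 by omega]; omega
    · simp [List.countP_cons, List.filter_cons, hx, show x < 0 by omega]; omega

-- ===== VERDICT (by name: the statement is the Claim_ definition above) =====
theorem compact_filemap_spec : Claim_equal_compact_filemap := by
  intro xs _
  show Spec_compact_filemap xs (compact_filemap xs)
  simp only [Spec_compact_filemap, compact_filemap, compact_filemap_alt,
    PySem.List.slice_to_natCast]
  generalize hT : (xs.filter (fun x => decide (0 ≤ x))).length = t
  have ht_le : t ≤ xs.length := by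
    rw [← hT]; exact List.length_filter_le _ _
  have hA := pvAloop_eq xs 0 ((xs.length : Int) - 1) le_rfl (by omega)
  have hseg0 : ((xs.drop (0 : Int).toNat).take (((xs.length : Int) - 1) + 1 - 0).toNat) = xs := by
    simp
  rw [hseg0] at hA
  have hFF := pvFseg_fill xs
  rw [hT] at hFF
  rw [hA, hFF, pvPad_eq]
  have hsplit : (xs.take t).filter (fun x => decide (0 ≤ x))
      ++ (xs.drop t).filter (fun x => decide (0 ≤ x)) = xs.filter (fun x => decide (0 ≤ x)) := by
    rw [← List.filter_append, List.take_append_drop]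
  have h3 : (xs.take t).length = t := by
    simp [ht_le]
  have hneg : (xs.take t).countP (fun x => decide (x < 0))
      = ((xs.drop t).filter (fun x => decide (0 ≤ x))).length := by
    have h1 : ((xs.take t).filter (fun x => decide (0 ≤ x))).length
        + ((xs.drop t).filter (fun x => decide (0 ≤ x))).length = t := by
      rw [← List.length_append, hsplit, hT]
    have h2 := pvCount (xs.take t)
    omega
  have hB : pvBloop (xs.take t) (xs.filter (fun x => decide (0 ≤ x)))
      = pvFill (xs.take t) (((xs.drop t).filter (fun x => decide (0 ≤ x))).reverse) := by
    rw [← hsplit]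
    exact pvBloop_fill _ _ _ hneg
  rw [hB, pvLenFill _ _ (by simp [hneg]), h3]
  congr 1
  congr 1
  omega
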